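-- pv_equiv track=rewrite | github.com/PaddlePaddle/PaddleSpeech | paddlespeech/s2t/utils/text_grid.py | segment_alignment
-- ===== SOURCE A (Python) =====
-- from typing import List
--
-- def segment_alignment(alignment: List[int], blank_id=0) -> List[List[int]]:
--     """segment ctc alignment ids by continuous blank and repeat label.
--
--     Args:
--         alignment (List[int]): ctc alignment id sequence.
--             e.g. [0, 0, 0, 1, 1, 1, 2, 0, 0, 3]
--         blank_id (int, optional): blank id. Defaults to 0.
--
--     Returns:
--         List[List[int]]: token align, segment aligment id sequence.
--             e.g. [[0, 0, 0, 1, 1, 1], [2], [0, 0, 3]]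
--     """
--     # convert alignment to a praat format, which is a doing phonetics
--     # by computer and helps analyzing alignment
--     align_segs = []
--     # get frames level duration for each token
--     start = 0
--     end = 0
--     while end < len(alignment):
--         while end < len(alignment) and alignment[end] == blank_id:  # blank
--             end += 1
--         if end == len(alignment):
--             align_segs[-1].extend(alignment[start:])
--             break
--         end += 1
--         while end < len(alignment) and alignment[end - 1] == alignment[
--                 end]:  # repeat label
--             end += 1
--         align_segs.append(alignment[start:end])
--         start = end
--     return align_segs
-- ===== SOURCE B (Python) =====
-- from typing import List
--
--
-- def segment_alignment(alignment: List[int], blank_id=0) -> List[List[int]]: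
--     """Two-pass re-implementation: collapse the alignment into consecutive
--     (value, count) runs, then emit one segment per non-blank run, prefixing
--     it with the buffered blank frames; trailing blanks extend the last segment."""
--     # pass 1: consecutive runs as (value, count)
--     runs = []
--     for x in alignment:
--         if runs and runs[-1][0] == x:
--             runs[-1] = (x, runs[-1][1] + 1)
--         else:
--             runs.append((x, 1))
--     # pass 2: buffer blank runs, emit on each non-blank run
--     segs = []
--     pending = []
--     for val, cnt in runs:
--         if val == blank_id:
--             pending = pending + [val] * cnt
--         else:
--             segs.append(pending + [val] * cnt)
--             pending = []
--     if pending: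
--         segs[-1].extend(pending)
--     return segs
-- ===== Notes on version B (the rewrite author's own statement) =====
-- stated objective: alternative
-- what changed: A scans with nested index-based while loops and slices segments out of the full list; B first collapses the alignment into consecutive (value,count) runs and then emits one segment per non-blank run from a buffer of pending blank frames.
import Mathlib
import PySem

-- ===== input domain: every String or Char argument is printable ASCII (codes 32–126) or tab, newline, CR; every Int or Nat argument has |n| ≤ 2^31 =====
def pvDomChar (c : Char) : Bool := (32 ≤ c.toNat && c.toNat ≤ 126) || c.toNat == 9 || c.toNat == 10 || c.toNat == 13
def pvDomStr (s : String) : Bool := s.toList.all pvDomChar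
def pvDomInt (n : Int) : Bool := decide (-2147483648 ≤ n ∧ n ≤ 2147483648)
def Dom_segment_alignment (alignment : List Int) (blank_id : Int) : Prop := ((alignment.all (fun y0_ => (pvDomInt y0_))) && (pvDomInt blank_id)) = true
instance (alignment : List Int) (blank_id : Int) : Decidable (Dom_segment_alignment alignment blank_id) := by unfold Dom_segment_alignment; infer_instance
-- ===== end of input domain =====

-- B replaces A's nested index-scanning while loops by a two-pass decomposition
-- (collapse into consecutive (value,count) runs, then emit segments from the runs
-- with a buffer of pending blanks); objective: alternative decomposition, same cost.

-- ===== PORT A =====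
-- inner `while end < len(alignment) and alignment[end] == blank_id: end += 1`
-- (alignment[end] is guarded in range, so getD is exact here)
def pvBlankEnd (a : List Int) (b : Int) (e : Nat) : Nat :=
  if h : e < a.length ∧ a.getD e 0 = b then pvBlankEnd a b (e + 1) else e
termination_by a.length - e
decreasing_by exact Nat.sub_succ_lt_self _ _ h.1

-- inner `while end < len(alignment) and alignment[end-1] == alignment[end]: end += 1`
def pvRepEnd (a : List Int) (e : Nat) : Nat :=
  if h : e < a.length ∧ a.getD (e - 1) 0 = a.getD e 0 then pvRepEnd a (e + 1) else e
termination_by a.length - e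
decreasing_by exact Nat.sub_succ_lt_self _ _ h.1

-- `segs[-1].extend(t)`; Python raises IndexError on the [] case (excluded by Pre_)
def pvExtendLast : List (List Int) → List Int → List (List Int)
  | [], _ => []
  | [s], t => [s ++ t]
  | s :: r, t => s :: pvExtendLast r t

theorem pvBlankEnd_ge (a : List Int) (b : Int) (e : Nat) : e ≤ pvBlankEnd a b e := by
  unfold pvBlankEnd
  split
  · exact Nat.le_trans (Nat.le_succ e) (pvBlankEnd_ge a b (e + 1))
  · exact Nat.le_refl e
termination_by a.length - e
decreasing_by rename_i h; exact Nat.sub_succ_lt_self _ _ h.1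

theorem pvRepEnd_ge (a : List Int) (e : Nat) : e ≤ pvRepEnd a e := by
  unfold pvRepEnd
  split
  · exact Nat.le_trans (Nat.le_succ e) (pvRepEnd_ge a (e + 1))
  · exact Nat.le_refl e
termination_by a.length - e
decreasing_by rename_i h; exact Nat.sub_succ_lt_self _ _ h.1

-- outer `while end < len(alignment)` of A; `start` = `end` at every loop head,
-- e1 = the first `while`'s final `end`, e2 = the second `while`'s final `end`
def pvAlignLoop (a : List Int) (b : Int) (start e : Nat) (segs : List (List Int)) :
    List (List Int) :=
  if h : e < a.length then
    if pvBlankEnd a b e = a.length then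
      pvExtendLast segs (PySem.List.slice a (some (start : Int)) none)
    else
      pvAlignLoop a b (pvRepEnd a (pvBlankEnd a b e + 1)) (pvRepEnd a (pvBlankEnd a b e + 1))
        (segs ++ [PySem.List.slice a (some (start : Int))
                    (some ((pvRepEnd a (pvBlankEnd a b e + 1) : Nat) : Int))])
  else segs
termination_by a.length - e
decreasing_by
  exact Nat.sub_lt_sub_left h (Nat.lt_of_le_of_lt (pvBlankEnd_ge a b e)
    (Nat.lt_of_lt_of_le (Nat.lt_succ_self _) (pvRepEnd_ge a (pvBlankEnd a b e + 1))))

def segment_alignment (alignment : List Int) (blank_id : Int) : List (List Int) :=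
  pvAlignLoop alignment blank_id 0 0 []

-- ===== PORT B =====
-- pass-1 body: `if runs and runs[-1][0] == x: runs[-1] = (x, runs[-1][1] + 1) else: runs.append((x, 1))`
def pvRunStep (runs : List (Int × Nat)) (x : Int) : List (Int × Nat) :=
  match runs.getLast? with
  | some (v, n) => if v = x then runs.dropLast ++ [(x, n + 1)] else runs ++ [(x, 1)]
  | none => runs ++ [(x, 1)]

-- pass 2: `for val, cnt in runs: …` then `if pending: segs[-1].extend(pending)`
def pvEmit (b : Int) : List (Int × Nat) → List (List Int) → List Int → List (List Int)
  | [], segs, pending => if pending ≠ [] then pvExtendLast segs pending else segs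
  | (v, n) :: rest, segs, pending =>
    if v = b then pvEmit b rest segs (pending ++ List.replicate n v)
    else pvEmit b rest (segs ++ [pending ++ List.replicate n v]) []

def segment_alignment_alt (alignment : List Int) (blank_id : Int) : List (List Int) :=
  pvEmit blank_id (alignment.foldl pvRunStep []) [] []

-- ===== PRECONDITION & SPEC =====
-- Pre_ excludes exactly the non-empty all-blank inputs, on which Python A raises
-- IndexError (align_segs[-1] on the empty list); Python B raises there too.
def Pre_segment_alignment (alignment : List Int) (blank_id : Int) : Prop :=
  alignment = [] ∨ ∃ x ∈ alignment, x ≠ blank_id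
instance (alignment : List Int) (blank_id : Int) :
    Decidable (Pre_segment_alignment alignment blank_id) := by
  unfold Pre_segment_alignment; infer_instance

def pvWitness_segment_alignment : List Int × Int := ([0, 0, 1, 1, 2, 0, 0, 3], 0)

def Spec_segment_alignment (alignment : List Int) (blank_id : Int)
    (out : List (List Int)) : Prop := out = segment_alignment_alt alignment blank_id
instance (alignment : List Int) (blank_id : Int) (out : List (List Int)) :
    Decidable (Spec_segment_alignment alignment blank_id out) := by
  unfold Spec_segment_alignment; infer_instance

-- ===== CLAIM (what is proved, stated in full; the proofs are below) =====
def Claim_equal_segment_alignment : Prop :=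
  ∀ (alignment : List Int) (blank_id : Int), Dom_segment_alignment alignment blank_id →
    Pre_segment_alignment alignment blank_id →
    Spec_segment_alignment alignment blank_id (segment_alignment alignment blank_id)

-- ===== LEMMAS AND PROOFS =====

-- proof-side reference: the consecutive runs of a list, computed front to back
def pvRunsTD : List Int → List (Int × Nat)
  | [] => []
  | x :: xs =>
    (x, 1 + (xs.takeWhile (· == x)).length) :: pvRunsTD (xs.dropWhile (· == x))
termination_by l => l.length
decreasing_by
  simp only [List.length_cons]
  exact Nat.lt_succ_of_le (List.length_dropWhile_le _ _)

theorem pvGetD_drop_cons {a : List Int} {e : Nat} {y : Int} {ys : List Int}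
    (hd : a.drop e = y :: ys) : a.getD e 0 = y := by
  have h0 : (a.drop e)[0]? = a[e + 0]? := List.getElem?_drop
  rw [hd] at h0
  simp only [List.getElem?_cons_zero, Nat.add_zero] at h0
  rw [List.getD_eq_getElem?_getD, ← h0]
  rfl

theorem drop_succ_of_drop_cons {a : List Int} {e : Nat} {y : Int} {ys : List Int}
    (hd : a.drop e = y :: ys) : a.drop (e + 1) = ys := by
  have h1 : (a.drop e).drop 1 = a.drop (e + 1) := List.drop_drop
  rw [hd] at h1
  simpa using h1.symm

theorem pvBlankEnd_eq (a : List Int) (b : Int) (e : Nat) :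
    pvBlankEnd a b e = e + ((a.drop e).takeWhile (· == b)).length := by
  rw [pvBlankEnd]
  rcases hd : a.drop e with _ | ⟨y, ys⟩
  · have hnc : ¬ (e < a.length ∧ a.getD e 0 = b) := by
      rintro ⟨h1, -⟩
      rw [List.drop_eq_nil_iff] at hd
      omega
    rw [dif_neg hnc]
    simp
  · have he : e < a.length := by
      by_contra hc
      rw [List.drop_of_length_le (by omega)] at hd
      cases hd
    have hg : a.getD e 0 = y := pvGetD_drop_cons hd
    have hd1 : a.drop (e + 1) = ys := drop_succ_of_drop_cons hd
    by_cases hy : y = b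
    · rw [dif_pos ⟨he, by rw [hg, hy]⟩, pvBlankEnd_eq a b (e + 1), hd1,
        List.takeWhile_cons_of_pos (by simp [hy])]
      simp only [List.length_cons]
      omega
    · have hnc : ¬ (e < a.length ∧ a.getD e 0 = b) := by
        rintro ⟨-, h2⟩
        rw [hg] at h2
        exact hy h2
      rw [dif_neg hnc, List.takeWhile_cons_of_neg (by simp [hy])]
      simp
termination_by a.length - e
decreasing_by omega

theorem pvRepEnd_eq (a : List Int) (v : Int) (e : Nat) (hv : a.getD (e - 1) 0 = v) :
    pvRepEnd a e = e + ((a.drop e).takeWhile (· == v)).length := by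
  rw [pvRepEnd]
  rcases hd : a.drop e with _ | ⟨y, ys⟩
  · have hnc : ¬ (e < a.length ∧ a.getD (e - 1) 0 = a.getD e 0) := by
      rintro ⟨h1, -⟩
      rw [List.drop_eq_nil_iff] at hd
      omega
    rw [dif_neg hnc]
    simp
  · have he : e < a.length := by
      by_contra hc
      rw [List.drop_of_length_le (by omega)] at hd
      cases hd
    have hg : a.getD e 0 = y := pvGetD_drop_cons hd
    have hd1 : a.drop (e + 1) = ys := drop_succ_of_drop_cons hd
    by_cases hy : y = v
    · rw [dif_pos ⟨he, by rw [hv, hg]; exact hy.symm⟩,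
        pvRepEnd_eq a v (e + 1) (by simpa using hg.trans hy), hd1,
        List.takeWhile_cons_of_pos (by simp [hy])]
      simp only [List.length_cons]
      omega
    · have hnc : ¬ (e < a.length ∧ a.getD (e - 1) 0 = a.getD e 0) := by
        rintro ⟨-, h2⟩
        rw [hv, hg] at h2
        exact hy h2.symm
      rw [dif_neg hnc, List.takeWhile_cons_of_neg (by simp [hy])]
      simp
termination_by a.length - e
decreasing_by omega

theorem replicate_of_all {t : List Int} {b : Int} (ht : ∀ z ∈ t, z = b) :
    List.replicate t.length b = t :=
  (List.eq_replicate_of_mem ht).symm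

theorem all_takeWhile_eq (l : List Int) (x : Int) :
    ∀ z ∈ l.takeWhile (· == x), z = x := by
  intro z hz
  have := List.mem_takeWhile_imp hz
  simpa using this

-- emitting one (possibly blank-prefixed) segment from the runs of its frames
theorem emit_runs_cons (b y : Int) (ys : List Int) (segs : List (List Int))
    (pending : List Int) (hy : y ≠ b) :
    pvEmit b (pvRunsTD (y :: ys)) segs pending =
      pvEmit b (pvRunsTD (ys.dropWhile (· == y)))
        (segs ++ [pending ++ y :: ys.takeWhile (· == y)]) [] := by
  have hrep : List.replicate (1 + (ys.takeWhile (· == y)).length) y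
      = y :: ys.takeWhile (· == y) := by
    have hall : ∀ z ∈ y :: ys.takeWhile (· == y), z = y := by
      intro z hz
      rcases List.mem_cons.mp hz with h | h
      · exact h
      · exact all_takeWhile_eq ys y z h
    rw [Nat.add_comm]
    simpa using replicate_of_all hall
  rw [pvRunsTD, pvEmit, if_neg hy, hrep]

theorem emit_runs_split (b y : Int) (t ys : List Int) (segs : List (List Int))
    (ht : ∀ z ∈ t, z = b) (hy : y ≠ b) :
    pvEmit b (pvRunsTD (t ++ y :: ys)) segs [] =
      pvEmit b (pvRunsTD (ys.dropWhile (· == y)))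
        (segs ++ [t ++ y :: ys.takeWhile (· == y)]) [] := by
  rcases t with _ | ⟨z, zs⟩
  · simpa using emit_runs_cons b y ys segs [] hy
  · have hz : z = b := ht z (by simp)
    have htz : ∀ w ∈ z :: zs, w = z := fun w hw => (ht w hw).trans hz.symm
    have hzs : ∀ w ∈ zs, w = z := fun w hw => htz w (by simp [hw])
    have hyz2 : y ≠ z := fun hc => hy (hc.trans hz)
    have hyz : (y :: ys).takeWhile (· == z) = [] :=
      List.takeWhile_cons_of_neg (by simp [hyz2])
    have h1 : (zs ++ y :: ys).takeWhile (· == z) = zs := by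
      have hzz : zs.takeWhile (· == z) = zs :=
        List.takeWhile_eq_self_iff.mpr (fun w hw => by simp [hzs w hw])
      rw [List.takeWhile_append, if_pos (by rw [hzz]), hyz, List.append_nil]
    have h2 : (zs ++ y :: ys).dropWhile (· == z) = y :: ys := by
      have hzz : zs.dropWhile (· == z) = [] :=
        List.dropWhile_eq_nil_iff.mpr (fun w hw => by simp [hzs w hw])
      rw [List.dropWhile_append, hzz]
      simpa using List.dropWhile_cons_of_neg (p := (· == z)) (l := ys) (by simp [hyz2])
    have hp : ([] : List Int) ++ List.replicate (1 + zs.length) z = z :: zs := by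
      rw [Nat.add_comm]
      simpa using replicate_of_all htz
    rw [List.cons_append, pvRunsTD, h1, h2, pvEmit, if_pos hz, hp,
      emit_runs_cons b y ys segs (z :: zs) hy]

theorem emit_runs_all_blank (b : Int) (t : List Int) (segs : List (List Int))
    (ht : ∀ z ∈ t, z = b) (hne : t ≠ []) :
    pvEmit b (pvRunsTD t) segs [] = pvExtendLast segs t := by
  rcases t with _ | ⟨z, zs⟩
  · exact absurd rfl hne
  · have hz : z = b := ht z (by simp)
    have htz : ∀ w ∈ z :: zs, w = z := fun w hw => (ht w hw).trans hz.symm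
    have hzs : ∀ w ∈ zs, w = z := fun w hw => htz w (by simp [hw])
    have h1 : zs.takeWhile (· == z) = zs :=
      List.takeWhile_eq_self_iff.mpr (fun w hw => by simp [hzs w hw])
    have h2 : zs.dropWhile (· == z) = [] :=
      List.dropWhile_eq_nil_iff.mpr (fun w hw => by simp [hzs w hw])
    have hp : ([] : List Int) ++ List.replicate (1 + zs.length) z = z :: zs := by
      rw [Nat.add_comm]
      simpa using replicate_of_all htz
    rw [pvRunsTD, h1, h2, pvRunsTD, pvEmit, if_pos hz, hp, pvEmit,
      if_pos (by simp)]

-- A's outer loop, from any loop head (start = end = st), equals B's second pass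
-- over the runs of the unprocessed suffix
theorem pvAlign_main (a : List Int) (b : Int) (st : Nat) (segs : List (List Int)) :
    pvAlignLoop a b st st segs = pvEmit b (pvRunsTD (a.drop st)) segs [] := by
  rw [pvAlignLoop]
  by_cases h : st < a.length
  · rw [dif_pos h]
    set t := (a.drop st).takeWhile (· == b) with hT
    have htd : t ++ (a.drop st).dropWhile (· == b) = a.drop st := by
      rw [hT]; exact List.takeWhile_append_dropWhile
    have hbe : pvBlankEnd a b st = st + t.length := by
      rw [hT]; exact pvBlankEnd_eq a b st
    have hlen : (a.drop st).length = a.length - st := List.length_drop ..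
    have hallt : ∀ z ∈ t, z = b := by
      rw [hT]; exact all_takeWhile_eq _ b
    rcases hd : (a.drop st).dropWhile (· == b) with _ | ⟨y, ys⟩
    · rw [hd, List.append_nil] at htd
      have h1 : t.length = a.length - st := by rw [htd]; exact hlen
      rw [if_pos (by omega), PySem.List.slice_from_natCast, eq_comm, ← htd]
      apply emit_runs_all_blank b t segs hallt
      intro hc
      have h2 : a.drop st = [] := by rw [← htd, hc]
      rw [List.drop_eq_nil_iff] at h2
      omega
    · rw [hd] at htd
      have hyb : y ≠ b := by
        have h1 := List.head?_dropWhile_not (· == b) (a.drop st)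
        rw [hd] at h1
        simpa using h1
      have hlene : t.length + ys.length + 1 = a.length - st := by
        have h5 := congrArg List.length htd
        simp [hlen] at h5
        omega
      rw [if_neg (by omega)]
      have hdropE1 : a.drop (st + t.length) = y :: ys := by
        have h1 : (a.drop st).drop t.length = a.drop (st + t.length) := List.drop_drop
        rw [← h1, ← htd]
        exact List.drop_left
      have hgety : a.getD (st + t.length) 0 = y := pvGetD_drop_cons hdropE1
      have hdrop1 : a.drop (st + t.length + 1) = ys := drop_succ_of_drop_cons hdropE1
      set r := ys.takeWhile (· == y) with hR
      have hrd : r ++ ys.dropWhile (· == y) = ys := by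
        rw [hR]; exact List.takeWhile_append_dropWhile
      have hv1 : a.getD (st + t.length + 1 - 1) 0 = y := by simpa using hgety
      have hre : pvRepEnd a (pvBlankEnd a b st + 1) = st + t.length + 1 + r.length := by
        rw [hbe, pvRepEnd_eq a y (st + t.length + 1) hv1, hdrop1, ← hR]
      have hdropE2 : a.drop (st + t.length + 1 + r.length) = ys.dropWhile (· == y) := by
        have h1 : (a.drop (st + t.length + 1)).drop r.length
            = a.drop (st + t.length + 1 + r.length) := List.drop_drop
        rw [← h1, hdrop1]
        conv_lhs => rw [← hrd]
        exact List.drop_left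
      have hslice : PySem.List.slice a (some (st : Int))
            (some ((pvRepEnd a (pvBlankEnd a b st + 1) : Nat) : Int)) = t ++ y :: r := by
        rw [hre, PySem.List.slice_natCast]
        have harith : st + t.length + 1 + r.length - st = t.length + (1 + r.length) := by
          omega
        rw [harith]
        conv_lhs => rw [← htd]
        rw [List.take_append]
        congr 1
        · exact List.take_of_length_le (by omega)
        · have h2 : t.length + (1 + r.length) - t.length = r.length + 1 := by omega
          rw [h2, List.take_succ_cons]
          congr 1
          conv_lhs => rw [← hrd]
          exact List.take_left
      rw [hslice, hre,
        pvAlign_main a b (st + t.length + 1 + r.length) (segs ++ [t ++ y :: r]),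
        hdropE2, hR, eq_comm]
      conv_lhs => rw [← htd]
      exact emit_runs_split b y t ys segs hallt hyb
  · rw [dif_neg h, List.drop_of_length_le (by omega)]
    simp [pvRunsTD, pvEmit]
termination_by a.length - st
decreasing_by omega

-- pass 1 of B: the foldl over pvRunStep computes exactly the runs
theorem runStep_fresh (acc : List (Int × Nat)) (x : Int)
    (h : ∀ p, acc.getLast? = some p → p.1 ≠ x) : pvRunStep acc x = acc ++ [(x, 1)] := by
  unfold pvRunStep
  split
  · rename_i v n heq
    rw [if_neg (h (v, n) heq)]
  · rfl

theorem foldl_run_const (x : Int) : ∀ (u : List Int), (∀ z ∈ u, z = x) →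
    ∀ (acc : List (Int × Nat)) (n : Nat),
      List.foldl pvRunStep (acc ++ [(x, n)]) u = acc ++ [(x, n + u.length)] := by
  intro u
  induction u with
  | nil => intro _ acc n; simp
  | cons z u ih =>
    intro hz acc n
    have hzx : z = x := hz z (by simp)
    subst hzx
    rw [List.foldl_cons]
    have hstep : pvRunStep (acc ++ [(z, n)]) z = acc ++ [(z, n + 1)] := by
      unfold pvRunStep
      rw [List.getLast?_concat]
      simp
    rw [hstep, ih (fun w hw => hz w (List.mem_cons_of_mem _ hw)) acc (n + 1)]
    have harith : n + 1 + u.length = n + (z :: u).length := by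
      simp only [List.length_cons]
      omega
    rw [harith]

theorem foldl_runs (l : List Int) : ∀ (acc : List (Int × Nat)),
    (∀ p, acc.getLast? = some p → ∀ h' ∈ l.head?, p.1 ≠ h') →
    List.foldl pvRunStep acc l = acc ++ pvRunsTD l := by
  rcases l with _ | ⟨x, xs⟩
  · intro acc _
    simp [pvRunsTD]
  · intro acc hacc
    rw [List.foldl_cons, runStep_fresh acc x (fun p hp => hacc p hp x (by simp))]
    have hsplit := List.takeWhile_append_dropWhile (p := (· == x)) (l := xs)
    conv_lhs => rw [← hsplit]
    rw [List.foldl_append,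
      foldl_run_const x (xs.takeWhile (· == x)) (all_takeWhile_eq xs x) acc 1]
    have hcond : ∀ p, (acc ++ [(x, 1 + (xs.takeWhile (· == x)).length)]).getLast?
        = some p → ∀ h' ∈ (xs.dropWhile (· == x)).head?, p.1 ≠ h' := by
      intro p hp h' hh'
      rw [List.getLast?_concat] at hp
      injection hp with hp'
      subst hp'
      rw [Option.mem_def] at hh'
      have h1 := List.head?_dropWhile_not (· == x) xs
      rw [hh'] at h1
      simp only [beq_eq_false_iff_ne] at h1
      intro hc
      exact h1 hc.symm
    rw [foldl_runs (xs.dropWhile (· == x)) _ hcond, pvRunsTD]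
    simp
termination_by l.length
decreasing_by
  simp only [List.length_cons]
  exact Nat.lt_succ_of_le (List.length_dropWhile_le _ _)

-- ===== VERDICT (by name: the statement is the Claim_ definition above) =====
theorem segment_alignment_spec : Claim_equal_segment_alignment := by
  intro a b _ _
  unfold Spec_segment_alignment segment_alignment segment_alignment_alt
  rw [pvAlign_main a b 0 [], foldl_runs a [] (by simp), List.drop_zero]
  simp
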